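-- pv_equiv track=rewrite | github.com/Bharath9t7/Data-Structures-and-Algorithms-using-Python | Data Structures/fibonacci.py | fib1
-- ===== SOURCE A (Python) =====
-- def fib1(A):
--     output = []
--     max_num = 50
--     fib_list = [0,1]
--     i = 0
--     while len(fib_list)<max_num:
--         fib_list.append(fib_list[i]+fib_list[i+1])
--         i += 1
--     for num in A:
--         if num in fib_list:
--             output.append(num)
--     return output
-- ===== SOURCE B (Python) =====
-- def fib1(A):
--     # Keep elements that are Fibonacci numbers, tested per element by
--     # climbing the Fibonacci sequence instead of precomputing a 50-term list.
--     def is_fib(n):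
--         a, b = 0, 1
--         while a < n:
--             a, b = b, a + b
--         return a == n
--     return [num for num in A if is_fib(num)]
-- ===== Notes on version B (the rewrite author's own statement) =====
-- stated objective: simpler
-- what changed: Replaces the precomputed 50-element Fibonacci list and linear membership scan with a per-element climb of the Fibonacci pair (a,b) that stops at the first Fibonacci number >= n and compares it to n.
import Mathlib
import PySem

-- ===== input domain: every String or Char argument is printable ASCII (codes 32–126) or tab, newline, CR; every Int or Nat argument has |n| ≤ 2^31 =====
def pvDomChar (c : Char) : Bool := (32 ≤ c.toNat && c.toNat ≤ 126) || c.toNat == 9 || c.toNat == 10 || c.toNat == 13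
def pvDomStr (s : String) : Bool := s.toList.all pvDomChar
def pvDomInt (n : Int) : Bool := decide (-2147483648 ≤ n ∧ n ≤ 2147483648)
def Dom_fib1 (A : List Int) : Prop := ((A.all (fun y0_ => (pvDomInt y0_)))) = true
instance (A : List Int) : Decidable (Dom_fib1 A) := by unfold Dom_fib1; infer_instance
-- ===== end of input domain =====

-- B replaces A's precomputed 50-element Fibonacci list and membership scan by a
-- per-element climb of the Fibonacci pair (simpler; no precomputed table).

-- ===== PORT A =====
-- the while loop building fib_list; indices i, i+1 are always in range, so getD's
-- default is never used
def fib1Build : Nat → List Int → Nat → List Int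
  | 0, fl, _ => fl
  | fuel + 1, fl, i =>
      if fl.length < 50 then
        fib1Build fuel (fl ++ [fl.getD i 0 + fl.getD (i + 1) 0]) (i + 1)
      else fl

def fib1 (A : List Int) : List Int :=
  let fib_list := fib1Build 48 [0, 1] 0
  A.foldl (fun output num => if fib_list.contains num then output ++ [num] else output) []

-- ===== PORT B =====
-- the `while a < n` climb of Source B; fuel 48 is enough on the domain |n| ≤ 2^31,
-- since the 47th climbed Fibonacci value 2971215073 exceeds 2^31
def fib1IsFib (n a b : Int) : Nat → Bool
  | 0 => false
  | fuel + 1 => if a < n then fib1IsFib n b (a + b) fuel else a == n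

def fib1_alt (A : List Int) : List Int :=
  A.filter (fun num => fib1IsFib num 0 1 48)

-- ===== PRECONDITION & SPEC =====
def Spec_fib1 (A : List Int) (out : List Int) : Prop := out = fib1_alt A
instance (A : List Int) (out : List Int) : Decidable (Spec_fib1 A out) := by unfold Spec_fib1; infer_instance

-- ===== CLAIM (what is proved, stated in full; the proofs are below) =====
def Claim_equal_fib1 : Prop := ∀ (A : List Int), Dom_fib1 A → Spec_fib1 A (fib1 A)

-- ===== LEMMAS AND PROOFS =====

-- the 50-element list A builds
def fibL : List Int :=
  [0, 1, 1, 2, 3, 5, 8, 13, 21, 34, 55, 89, 144, 233, 377, 610, 987, 1597, 2584,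
   4181, 6765, 10946, 17711, 28657, 46368, 75025, 121393, 196418, 317811, 514229,
   832040, 1346269, 2178309, 3524578, 5702887, 9227465, 14930352, 24157817,
   39088169, 63245986, 102334155, 165580141, 267914296, 433494437, 701408733,
   1134903170, 1836311903, 2971215073, 4807526976, 7778742049]

lemma fib1Build_eq : fib1Build 48 [0, 1] 0 = fibL := by decide

-- the a-values the climb visits, in order
def fibChain (a b : Int) : Nat → List Int
  | 0 => []
  | fuel + 1 => a :: fibChain b (a + b) fuel

lemma isFib_true_mem : ∀ (fuel : Nat) (a b n : Int),
    fib1IsFib n a b fuel = true → n ∈ fibChain a b fuel := by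
  intro fuel
  induction fuel with
  | zero => intro a b n h; simp [fib1IsFib] at h
  | succ f ih =>
      intro a b n h
      simp only [fib1IsFib] at h
      by_cases hlt : a < n
      · simp only [hlt, if_pos] at h
        exact List.mem_cons_of_mem _ (ih b (a + b) n h)
      · simp only [hlt, if_neg, not_false_iff] at h
        have : a = n := by exact_mod_cast (beq_iff_eq.mp h)
        simp [fibChain, this]

lemma chain48_subset : ∀ n ∈ fibChain 0 1 48, n ∈ fibL := by decide

lemma mem_isFib (n : Int) (hle : n ≤ 2147483648) (h : n ∈ fibL) :
    fib1IsFib n 0 1 48 = true := by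
  fin_cases h <;> first
    | decide
    | (exact absurd hle (by decide))

lemma point (n : Int) (hle : n ≤ 2147483648) :
    fibL.contains n = fib1IsFib n 0 1 48 := by
  by_cases hm : n ∈ fibL
  · rw [mem_isFib n hle hm]
    exact List.elem_eq_true_of_mem hm
  · have h2 : fib1IsFib n 0 1 48 = false := by
      cases h : fib1IsFib n 0 1 48 with
      | false => rfl
      | true => exact absurd (chain48_subset n (isFib_true_mem 48 0 1 n h)) hm
    rw [h2]
    simpa using hm

-- ===== VERDICT (by name: the statement is the Claim_ definition above) =====
theorem fib1_spec : Claim_equal_fib1 := by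
  intro A hDom
  unfold Spec_fib1 fib1 fib1_alt
  rw [fib1Build_eq]
  rw [PySem.List.foldl_append_if_eq_filter]
  simp only [List.nil_append]
  apply List.filter_congr
  intro x hx
  have hdx : pvDomInt x = true := by
    have := (List.all_eq_true.mp hDom) x hx
    simpa using this
  have hle : x ≤ 2147483648 := by
    simp [pvDomInt] at hdx; omega
  exact point x hle
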